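-- pv_equiv track=rewrite | github.com/albertvisser/hotkeys | plugin_examples/tcmdrkys_shared.py | keymods
-- ===== SOURCE A (Python) =====
-- def keymods(x):
--     """hulp bij omzetten keyboard.txt definitie in standaard definitie
--     """
--     extra = ""
--     if x[-1] == "+":
--         x = x[:-1]
--         extra = "+"
--     mods = ""
--     h = x.split("+", 1)
--     while len(h) > 1:
--         # if h[0] in ('SHIFT','ALT','CTRL'):
--         if h[0] in ('CTRL', 'ALT', 'SHIFT'):
--             mods += h[0][0]
--         h = h[1].split("+", 1)
--     keyc = h[0].replace(" ", "").capitalize() + extra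
--     if keyc == '\\':
--         keyc = 'OEM_US\\|'
--     # keyc = ' + '.join((keyc,mods))
--     mods = mods.replace('SC', 'CS')
--     return keyc, mods
-- ===== SOURCE B (Python) =====
-- def keymods(x):
--     """hulp bij omzetten keyboard.txt definitie in standaard definitie
--     """
--     extra = ""
--     if x[-1] == "+":
--         x = x[:-1]
--         extra = "+"
--     # character-level state machine: one pass over the characters, no split()
--     mods = []
--     token = []
--     for c in x:
--         if c == '+':
--             if ''.join(token) in ('CTRL', 'ALT', 'SHIFT'):
--                 mods.append(token[0])
--             token = []
--         else:
--             token.append(c)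
--     keyc = ''.join(ch for ch in token if ch != ' ')
--     keyc = keyc[:1].upper() + keyc[1:].lower() + extra
--     if keyc == '\\':
--         keyc = 'OEM_US\\|'
--     return keyc, ''.join(mods).replace('SC', 'CS')
-- ===== Notes on version B (the rewrite author's own statement) =====
-- stated objective: alternative
-- what changed: Replaces A's repeated split('+',1) while-loop over string pieces by a single character-level state machine (one pass over the characters with a (mods, current-token) accumulator; no split at all).
import Mathlib
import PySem

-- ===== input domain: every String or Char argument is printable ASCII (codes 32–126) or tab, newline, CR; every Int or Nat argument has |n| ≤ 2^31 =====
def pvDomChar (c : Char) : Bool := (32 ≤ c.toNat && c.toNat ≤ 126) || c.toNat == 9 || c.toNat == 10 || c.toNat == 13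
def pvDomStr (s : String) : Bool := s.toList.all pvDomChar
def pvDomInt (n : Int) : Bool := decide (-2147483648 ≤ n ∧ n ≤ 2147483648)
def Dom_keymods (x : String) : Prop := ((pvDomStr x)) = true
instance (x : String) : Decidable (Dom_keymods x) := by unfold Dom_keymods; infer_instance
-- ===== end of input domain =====

-- B replaces A's repeated split('+',1) while-loop by a single character-level state machine (no split at all); simpler decomposition. Return-value equivalence only.

-- ===== PORT A =====
-- Python's `t in ('CTRL', 'ALT', 'SHIFT')`
def kmIsMod (t : List Char) : Bool := t == "CTRL".toList || t == "ALT".toList || t == "SHIFT".toList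

-- Python's str.capitalize() (exact on ASCII: first char uppercased, rest lowercased)
def kmCapitalize (cs : List Char) : List Char :=
  match cs with
  | [] => []
  | c :: rest => PySem.Chars.upperChar c :: rest.map PySem.Chars.lowerChar

-- hand port of s.split('+', 1): (piece before first '+', rest after it if any); exact
def kmSplit1 (cs : List Char) : List Char × Option (List Char) :=
  match cs with
  | [] => ([], none)
  | c :: rest =>
      if c = '+' then ([], some rest)
      else
        let p := kmSplit1 rest
        (c :: p.1, p.2)

theorem kmSplit1_some_length (cs a r) (h : kmSplit1 cs = (a, some r)) : r.length < cs.length := by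
  induction cs generalizing a r with
  | nil => simp [kmSplit1] at h
  | cons c rest ih =>
      by_cases hc : c = '+'
      · simp [kmSplit1, hc] at h
        simp [← h.2]
      · simp only [kmSplit1, if_neg hc] at h
        rcases h2 : kmSplit1 rest with ⟨a', b'⟩
        rw [h2] at h
        cases b' with
        | none => simp at h
        | some r' =>
            simp at h
            obtain ⟨-, hr⟩ := h
            subst hr
            exact Nat.lt_succ_of_lt (ih a' _ h2)

-- A's while-loop over h = x.split('+', 1)
def kmLoopA (cs : List Char) (mods : List Char) : List Char × List Char :=
  match h : kmSplit1 cs with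
  | (a, none) => (a, mods)
  | (a, some r) => kmLoopA r (if kmIsMod a then mods ++ a.take 1 else mods)
termination_by cs.length
decreasing_by exact kmSplit1_some_length cs a r h

def keymods (x : String) : String × String :=
  match PySem.List.pyGet? x.toList (-1) with
  | none => ("", "")   -- x[-1] raises IndexError on "" : excluded by Pre_
  | some last =>
      let p := if last = '+' then (x.toList.dropLast, ['+']) else (x.toList, ([] : List Char))
      let r := kmLoopA p.1 []
      let keyc := kmCapitalize (PySem.Chars.replace r.1 [' '] []) ++ p.2
      let keyc := if keyc = ['\\'] then "OEM_US\\|".toList else keyc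
      (String.ofList keyc, String.ofList (PySem.Chars.replace r.2 ['S', 'C'] ['C', 'S']))

-- ===== PORT B =====
-- B's per-character transition: state = (mods so far, current token); '+' flushes the token
def kmStep (st : List Char × List Char) (c : Char) : List Char × List Char :=
  if c = '+' then (if kmIsMod st.2 then st.1 ++ st.2.take 1 else st.1, [])
  else (st.1, st.2 ++ [c])

def keymods_alt (x : String) : String × String :=
  match PySem.List.pyGet? x.toList (-1) with
  | none => ("", "")   -- x[-1] raises IndexError on "" : excluded by Pre_
  | some last =>
      let p := if last = '+' then (x.toList.dropLast, ['+']) else (x.toList, ([] : List Char))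
      let st := p.1.foldl kmStep ([], [])
      let k0 := st.2.filter (fun c => decide (c ≠ ' '))       -- ''.join(ch for ch in token if ch != ' ')
      let keyc := (k0.take 1).map PySem.Chars.upperChar ++ (k0.drop 1).map PySem.Chars.lowerChar ++ p.2
      let keyc := if keyc = ['\\'] then "OEM_US\\|".toList else keyc
      (String.ofList keyc, String.ofList (PySem.Chars.replace st.1 ['S', 'C'] ['C', 'S']))

-- ===== PRECONDITION & SPEC =====
-- Pre_ excludes only the empty string, on which A's x[-1] raises IndexError (B raises there too).
def Pre_keymods (x : String) : Prop := x ≠ ""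
instance (x : String) : Decidable (Pre_keymods x) := by unfold Pre_keymods; infer_instance
def pvWitness_keymods : String := "CTRL+SHIFT+F5"

def Spec_keymods (x : String) (out : String × String) : Prop := out = keymods_alt x
instance (x : String) (out : String × String) : Decidable (Spec_keymods x out) := by unfold Spec_keymods; infer_instance

-- ===== CLAIM (what is proved, stated in full; the proofs are below) =====
def Claim_equal_keymods : Prop := ∀ (x : String), Dom_keymods x → Pre_keymods x → Spec_keymods x (keymods x)

-- ===== LEMMAS AND PROOFS =====

-- the char fold over cs, started with pending token t, does one split('+',1) step
theorem foldl_kmStep_split1 (cs : List Char) (m t : List Char) :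
    List.foldl kmStep (m, t) cs =
      match kmSplit1 cs with
      | (a, none) => (m, t ++ a)
      | (a, some r) => List.foldl kmStep ((if kmIsMod (t ++ a) then m ++ (t ++ a).take 1 else m), []) r := by
  induction cs generalizing t with
  | nil => simp [kmSplit1]
  | cons c rest ih =>
      by_cases hc : c = '+'
      · simp [kmSplit1, hc, kmStep]
      · rcases h2 : kmSplit1 rest with ⟨a, b⟩
        have step : kmStep (m, t) c = (m, t ++ [c]) := by simp [kmStep, hc]
        cases b with
        | none =>
            simp only [kmSplit1, if_neg hc, h2, List.foldl_cons, step, ih]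
            simp
        | some r =>
            simp only [kmSplit1, if_neg hc, h2, List.foldl_cons, step, ih]
            simp

-- B's fold computes exactly A's loop state (swapped components)
theorem foldl_kmStep_eq_loopA (cs mods : List Char) :
    List.foldl kmStep (mods, []) cs = ((kmLoopA cs mods).2, (kmLoopA cs mods).1) := by
  fun_induction kmLoopA cs mods with
  | case1 cs mods a h =>
      rw [foldl_kmStep_split1, h]
      simp
  | case2 cs mods a r h ih =>
      rw [foldl_kmStep_split1, h]
      simp only [List.nil_append, dite_eq_ite] at ih ⊢
      rw [ih]

-- removing every ' ' with replace is filtering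
theorem replace_go_space (fuel : Nat) (l acc : List Char) (h : l.length ≤ fuel) :
    PySem.Chars.replace.go [' '] [] fuel l acc =
      acc.reverse ++ l.filter (fun c => decide (c ≠ ' ')) := by
  induction fuel generalizing l acc with
  | zero =>
      have : l = [] := List.eq_nil_of_length_eq_zero (Nat.le_zero.mp h)
      subst this
      simp [PySem.Chars.replace.go]
  | succ n ih =>
      cases l with
      | nil => simp [PySem.Chars.replace.go]
      | cons c t =>
          have ht : t.length ≤ n := Nat.lt_succ_iff.mp (by simpa using h)
          by_cases hc : c = ' '
          · subst hc
            rw [show PySem.Chars.replace.go [' '] [] (n + 1) (' ' :: t) acc =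
                  PySem.Chars.replace.go [' '] [] n t acc by
                simp [PySem.Chars.replace.go, List.isPrefixOf]]
            simp [ih t acc ht, List.filter]
          · rw [show PySem.Chars.replace.go [' '] [] (n + 1) (c :: t) acc =
                  PySem.Chars.replace.go [' '] [] n t (c :: acc) by
                simp [PySem.Chars.replace.go, List.isPrefixOf, hc, Ne.symm hc]]
            simp [ih t (c :: acc) ht, List.filter, hc]

theorem replace_space_eq_filter (cs : List Char) :
    PySem.Chars.replace cs [' '] [] = cs.filter (fun c => decide (c ≠ ' ')) := by
  simpa [PySem.Chars.replace] using replace_go_space cs.length cs [] le_rfl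

-- capitalize = upper-map of the first char ++ lower-map of the rest
theorem kmCapitalize_eq (cs : List Char) :
    kmCapitalize cs = (cs.take 1).map PySem.Chars.upperChar ++ (cs.drop 1).map PySem.Chars.lowerChar := by
  cases cs <;> simp [kmCapitalize]

-- ===== VERDICT (by name: the statement is the Claim_ definition above) =====
theorem keymods_spec : Claim_equal_keymods := by
  intro x _ hpre
  unfold Spec_keymods keymods keymods_alt
  rcases hget : PySem.List.pyGet? x.toList (-1) with _ | last
  · exfalso
    apply hpre
    have h0 : x.toList = [] := by
      simpa [PySem.List.pyGet?_neg_one] using hget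
    have := congrArg String.ofList h0
    simpa using this
  · simp only [foldl_kmStep_eq_loopA, replace_space_eq_filter, ← kmCapitalize_eq]
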